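-- pv_equiv track=rewrite | github.com/networkx/networkx | networkx/algorithms/Maximum Priority Matching/maximum_priority_matching.py | paths_to_base
-- ===== SOURCE A (Python) =====
-- def paths_to_base(list, u, base):
--     """
--     Programmers: Roi Meshulam and Liroy Melamed
--
--     Our paths_to_base is a private function. The function gets List , node and base of a bolssom and returns the two possible
--     paths from u to the base of the blossom.
--
--     :param list:List , u: node , base: node
--     :return: void
--
--     Tests:
--
--     >>> list = ['5','4','3','6','7']
--     >>> u = '7'
--     >>> base = '3'
--     >>> paths_to_base(list,u,base)
--     (['7', '5', '4', '3'], ['7', '6', '3'])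
--     >>> paths_to_base(['5', '4', '3', '6', '7'], '7', '3')
--     (['7', '5', '4', '3'], ['7', '6', '3'])
--     >>> paths_to_base(['5', '4', '3', '6', '7'], '5', '3')
--     (['5', '4', '3'], ['5', '7', '6', '3'])
--     >>> paths_to_base(['5', '4', '3', '6', '7'], '4', '3')
--     (['4', '3'], ['4', '5', '7', '6', '3'])
--     >>> paths_to_base(['1', '2', '3'], '2', '1')
--     (['2', '3', '1'], ['2', '1'])
--     >>> paths_to_base(['1', '2', '3'], '1', '1')
--     (['1'], ['1'])
--     >>> paths_to_base(['1', '2', '3'], '3', '1')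
--     (['3', '1'], ['3', '2', '1'])
--     >>> paths_to_base(['1', '2', '3', '4'], '1', '1')
--     (['1'], ['1'])
--     >>> paths_to_base(['1', '2', '3', '4'], '2', '1')
--     (['2', '3', '4', '1'], ['2', '1'])
--     >>> paths_to_base(['1', '2', '3', '4'], '3', '1')
--     (['3', '4', '1'], ['3', '2', '1'])
--     >>> paths_to_base(['1', '2', '3', '4'], '4', '1')
--     (['4', '1'], ['4', '3', '2', '1'])
--     >>> paths_to_base(['1', '2', '3', '4', '5'], '5', '3')
--     (['5', '1', '2', '3'], ['5', '4', '3'])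
--     """
--     path1 = []
--     path2 = []
--     pos = list.index(u)
--     temp = u
--
--     while temp != base:
--         # path1.insert(0,temp)
--         path1.append(temp)
--         if pos == (len(list) - 1):
--             pos = 0
--         else:
--             pos = pos + 1
--         temp = list[pos]
--     # path1.insert(0,base)
--     path1.append(base)
--     temp = u
--     pos = list.index(u)
--     while temp != base:
--
--         path2.append(temp)
--         if pos == 0:
--             pos = len(list) - 1
--         else:
--             pos = pos - 1
--         temp = list[pos]
--
--     path2.append(base)
--     return (path1, path2)
-- ===== SOURCE B (Python) =====
-- def paths_to_base(list, u, base):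
--     i = list.index(u)
--     rot = list[i:] + list[:i]
--     if u == base:
--         return ([u], [u])
--     j = rot.index(base)
--     k = len(rot) - 1 - rot[::-1].index(base)
--     return (rot[:j + 1], [u] + rot[k:][::-1])
-- ===== Notes on version B (the rewrite author's own statement) =====
-- stated objective: simpler
-- what changed: Replaces A's two index-stepping while loops (with manual wrap-around arithmetic) by rotating the list so u comes first and reading both paths off with index/slice/reverse operations.
-- outside the precondition, e.g. on paths_to_base(['1', '2'], '1', '3'): A does not finish within the time limit, B raises ValueError; on paths_to_base(['1', '2'], '3', '1'): A raises ValueError, B raises ValueError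
import Mathlib
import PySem

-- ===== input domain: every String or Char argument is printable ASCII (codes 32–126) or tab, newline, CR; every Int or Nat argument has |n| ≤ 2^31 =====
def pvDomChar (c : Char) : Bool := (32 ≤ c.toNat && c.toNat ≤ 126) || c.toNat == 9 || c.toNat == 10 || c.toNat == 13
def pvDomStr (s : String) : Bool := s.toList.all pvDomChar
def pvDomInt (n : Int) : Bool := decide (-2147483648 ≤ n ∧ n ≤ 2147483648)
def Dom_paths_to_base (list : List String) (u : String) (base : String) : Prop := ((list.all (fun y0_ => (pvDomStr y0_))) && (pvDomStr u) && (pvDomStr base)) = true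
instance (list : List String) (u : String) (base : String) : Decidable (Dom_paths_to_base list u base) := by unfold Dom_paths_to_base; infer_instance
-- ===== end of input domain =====

-- B replaces A's two index-stepping while loops by a rotation of the list plus slice/index
-- arithmetic (objective: simpler); equivalence is about the return value only.

-- ===== PORT A =====
-- forward while loop of A: while temp != base: append temp; pos := 0 if pos = len-1 else pos+1; temp := list[pos].
-- fuel only bounds the iteration count (under Pre_ the loop terminates before fuel runs out).
def pvLoopFwd (list : List String) (base : String) : Nat → Nat → String → List String → List String
  | 0, _, _, acc => acc
  | fuel + 1, pos, temp, acc =>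
    if temp = base then acc
    else
      let pos' := if pos = list.length - 1 then 0 else pos + 1
      let temp' := PySem.List.pyGetD list (pos' : Int) ""
      pvLoopFwd list base fuel pos' temp' (acc ++ [temp])

-- backward while loop of A: while temp != base: append temp; pos := len-1 if pos = 0 else pos-1; temp := list[pos]
def pvLoopBwd (list : List String) (base : String) : Nat → Nat → String → List String → List String
  | 0, _, _, acc => acc
  | fuel + 1, pos, temp, acc =>
    if temp = base then acc
    else
      let pos' := if pos = 0 then list.length - 1 else pos - 1
      let temp' := PySem.List.pyGetD list (pos' : Int) ""
      pvLoopBwd list base fuel pos' temp' (acc ++ [temp])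

def paths_to_base (list : List String) (u : String) (base : String) : List String × List String :=
  let pos := (PySem.List.index? list u).getD 0   -- list.index(u); Pre_ guarantees u ∈ list
  let path1 := pvLoopFwd list base (list.length + 1) pos u [] ++ [base]
  let path2 := pvLoopBwd list base (list.length + 1) pos u [] ++ [base]
  (path1, path2)

-- ===== PORT B =====
def paths_to_base_alt (list : List String) (u : String) (base : String) : List String × List String :=
  let i := (PySem.List.index? list u).getD 0
  let rot := PySem.List.slice list (some (i : Int)) none ++ PySem.List.slice list none (some (i : Int))
  if u = base then ([u], [u])
  else
    let j := (PySem.List.index? rot base).getD 0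
    let k := rot.length - 1 - (PySem.List.index? ((PySem.List.slice? rot none none (-1)).getD []) base).getD 0
    (PySem.List.slice rot none (some ((j : Int) + 1)),
     [u] ++ (PySem.List.slice? (PySem.List.slice rot (some (k : Int)) none) none none (-1)).getD [])

-- ===== PRECONDITION & SPEC =====
-- A raises ValueError when u ∉ list, and loops forever when u ≠ base and base ∉ list: both excluded.
def Pre_paths_to_base (list : List String) (u : String) (base : String) : Prop :=
  u ∈ list ∧ base ∈ list
instance (list : List String) (u : String) (base : String) : Decidable (Pre_paths_to_base list u base) := by unfold Pre_paths_to_base; infer_instance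

def pvWitness_paths_to_base : List String × String × String := (["5", "4", "3", "6", "7"], "7", "3")

def Spec_paths_to_base (list : List String) (u : String) (base : String) (out : List String × List String) : Prop := out = paths_to_base_alt list u base
instance (list : List String) (u : String) (base : String) (out : List String × List String) : Decidable (Spec_paths_to_base list u base out) := by unfold Spec_paths_to_base; infer_instance

-- ===== CLAIM (what is proved, stated in full; the proofs are below) =====
def Claim_equal_paths_to_base : Prop := ∀ (list : List String) (u : String) (base : String), Dom_paths_to_base list u base → Pre_paths_to_base list u base → Spec_paths_to_base list u base (paths_to_base list u base)

-- ===== LEMMAS AND PROOFS =====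

-- take-until (exclusive) of the first occurrence of base: the elements A's loops append
def pvCut (base : String) : List String → List String
  | [] => []
  | x :: xs => if x = base then [] else x :: pvCut base xs

lemma pvCut_take (base : String) (s : List String) (j : Nat) (hj : PySem.List.index? s base = some j) :
    s.take (j + 1) = pvCut base s ++ [base] := by
  induction s generalizing j with
  | nil => simp [PySem.List.index?] at hj
  | cons x xs ih =>
    by_cases hx : x = base
    · subst hx
      rw [PySem.List.index?_cons_self] at hj
      cases hj
      simp [pvCut]
    · rw [PySem.List.index?_cons_of_ne xs hx] at hj
      cases h' : PySem.List.index? xs base with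
      | none => rw [h'] at hj; simp at hj
      | some j' =>
        rw [h'] at hj; simp at hj
        subst hj
        simp [pvCut, hx, List.take_succ_cons, ih j' h']

-- element of the rotation: rot[m] = list[(i+m) % n]
lemma pvRot_getD (list : List String) (i m : Nat) (hi : i < list.length) (hm : m < list.length) :
    (list.drop i ++ list.take i).getD m "" = list.getD ((i + m) % list.length) "" := by
  have hlen : (list.drop i ++ list.take i).length = list.length := by simp; omega
  rw [List.getD_eq_getElem _ _ (by omega), List.getD_eq_getElem _ _ (Nat.mod_lt _ (by omega))]
  by_cases hcase : m < list.length - i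
  · rw [List.getElem_append_left (by simp; omega), List.getElem_drop]
    congr 1
    rw [Nat.mod_eq_of_lt (by omega)]
  · have hmod : (i + m) % list.length = i + m - list.length := by
      rw [Nat.mod_eq_sub_mod (by omega), Nat.mod_eq_of_lt (by omega)]
    rw [List.getElem_append_right (by simp; omega), List.getElem_take]
    congr 1
    simp only [List.length_drop]
    omega

lemma pvStepFwd (n p : Nat) (hp : p < n) :
    (if p = n - 1 then 0 else p + 1) = (p + 1) % n := by
  by_cases h : p = n - 1
  · rw [if_pos h, show p + 1 = n by omega, Nat.mod_self]
  · rw [if_neg h, Nat.mod_eq_of_lt (by omega)]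

lemma pvStepBwd (n p : Nat) (hp : p < n) :
    (if p = 0 then n - 1 else p - 1) = (p + (n - 1)) % n := by
  by_cases h : p = 0
  · rw [if_pos h, h, Nat.zero_add, Nat.mod_eq_of_lt (by omega)]
  · rw [if_neg h, show p + (n - 1) = (p - 1) + n by omega, Nat.add_mod_right,
      Nat.mod_eq_of_lt (by omega)]

-- forward loop walks the rotation front to back until the first base
lemma pvLoopFwd_eq (list : List String) (base : String) (i : Nat) (hi : i < list.length) :
    ∀ (fuel t : Nat) (acc : List String), t < list.length →
      base ∈ (list.drop i ++ list.take i).drop t →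
      list.length - t ≤ fuel →
      pvLoopFwd list base fuel ((i + t) % list.length) ((list.drop i ++ list.take i).getD t "") acc
        = acc ++ pvCut base ((list.drop i ++ list.take i).drop t) := by
  intro fuel
  induction fuel with
  | zero => intro t acc ht _ hf; omega
  | succ fuel ih =>
    intro t acc ht hmem hf
    have hlen : (list.drop i ++ list.take i).length = list.length := by simp; omega
    have htr : t < (list.drop i ++ list.take i).length := by omega
    have hdrop : (list.drop i ++ list.take i).drop t
        = (list.drop i ++ list.take i)[t] :: (list.drop i ++ list.take i).drop (t + 1) :=
      List.drop_eq_getElem_cons htr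
    rw [List.getD_eq_getElem _ _ htr]
    by_cases hb : (list.drop i ++ list.take i)[t] = base
    · rw [hdrop]
      simp only [pvLoopFwd, pvCut, if_pos hb, List.append_nil]
    · have hmem' : base ∈ (list.drop i ++ list.take i).drop (t + 1) := by
        rw [hdrop] at hmem
        rcases List.mem_cons.mp hmem with h | h
        · exact absurd h.symm hb
        · exact h
      have ht1 : t + 1 < list.length := by
        by_contra hc
        rw [List.drop_eq_nil_of_le (by omega)] at hmem'
        simp at hmem'
      have hplt : (i + t) % list.length < list.length := Nat.mod_lt _ (by omega)
      have hpos : ((i + t) % list.length + 1) % list.length = (i + (t + 1)) % list.length := by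
        rw [Nat.mod_add_mod, Nat.add_assoc]
      simp only [pvLoopFwd, if_neg hb]
      rw [pvStepFwd list.length _ hplt, hpos]
      rw [PySem.List.pyGetD_natCast, ← pvRot_getD list i (t + 1) hi ht1]
      rw [ih (t + 1) (acc ++ [(list.drop i ++ list.take i)[t]]) ht1 hmem' (by omega)]
      rw [hdrop]
      simp only [pvCut, if_neg hb, List.append_assoc, List.singleton_append]

-- the value sequence of the backward walk is u, rot[n-1], rot[n-2], …
lemma pvS2_getD (list : List String) (u : String) (i m : Nat) (hi : i < list.length)
    (hm1 : 1 ≤ m) (hm : m < list.length) :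
    (u :: ((list.drop i ++ list.take i).drop 1).reverse).getD m ""
      = (list.drop i ++ list.take i).getD (list.length - m) "" := by
  have hlen : (list.drop i ++ list.take i).length = list.length := by simp; omega
  have hrev : (((list.drop i ++ list.take i).drop 1).reverse).length = list.length - 1 := by
    simp; omega
  rw [List.getD_eq_getElem _ _ (by simp only [List.length_cons, hrev]; omega),
      List.getD_eq_getElem _ _ (by omega)]
  rcases m with _ | m'
  · omega
  · simp only [List.getElem_cons_succ]
    rw [List.getElem_reverse, List.getElem_drop]
    congr 1
    simp only [List.length_drop]
    omega

-- backward loop walks u then the reversed tail of the rotation until the first base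
lemma pvLoopBwd_eq (list : List String) (u base : String) (i : Nat) (hi : i < list.length) :
    ∀ (fuel t : Nat) (acc : List String), t < list.length →
      base ∈ (u :: ((list.drop i ++ list.take i).drop 1).reverse).drop t →
      list.length - t ≤ fuel →
      pvLoopBwd list base fuel ((i + (list.length - t)) % list.length)
          ((u :: ((list.drop i ++ list.take i).drop 1).reverse).getD t "") acc
        = acc ++ pvCut base ((u :: ((list.drop i ++ list.take i).drop 1).reverse).drop t) := by
  intro fuel
  induction fuel with
  | zero => intro t acc ht _ hf; omega
  | succ fuel ih =>
    intro t acc ht hmem hf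
    have hlen : (list.drop i ++ list.take i).length = list.length := by simp; omega
    have hs2len : (u :: ((list.drop i ++ list.take i).drop 1).reverse).length = list.length := by
      simp only [List.length_cons, List.length_reverse, List.length_drop]
      omega
    have hts : t < (u :: ((list.drop i ++ list.take i).drop 1).reverse).length := by omega
    have hdrop : (u :: ((list.drop i ++ list.take i).drop 1).reverse).drop t
        = (u :: ((list.drop i ++ list.take i).drop 1).reverse)[t]
            :: (u :: ((list.drop i ++ list.take i).drop 1).reverse).drop (t + 1) :=
      List.drop_eq_getElem_cons hts
    rw [List.getD_eq_getElem _ _ hts]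
    by_cases hb : (u :: ((list.drop i ++ list.take i).drop 1).reverse)[t] = base
    · rw [hdrop]
      simp only [pvLoopBwd, pvCut, if_pos hb, List.append_nil]
    · have hmem' : base ∈ (u :: ((list.drop i ++ list.take i).drop 1).reverse).drop (t + 1) := by
        rw [hdrop] at hmem
        rcases List.mem_cons.mp hmem with h | h
        · exact absurd h.symm hb
        · exact h
      have ht1 : t + 1 < list.length := by
        by_contra hc
        rw [List.drop_eq_nil_of_le (by omega)] at hmem'
        simp at hmem'
      have hplt : (i + (list.length - t)) % list.length < list.length := Nat.mod_lt _ (by omega)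
      have hpos : ((i + (list.length - t)) % list.length + (list.length - 1)) % list.length
          = (i + (list.length - (t + 1))) % list.length := by
        rw [Nat.mod_add_mod]
        rw [show i + (list.length - t) + (list.length - 1)
              = (i + (list.length - (t + 1))) + list.length by omega, Nat.add_mod_right]
      simp only [pvLoopBwd, if_neg hb]
      rw [pvStepBwd list.length _ hplt, hpos]
      rw [PySem.List.pyGetD_natCast, ← pvRot_getD list i (list.length - (t + 1)) hi (by omega)]
      rw [← pvS2_getD list u i (t + 1) hi (by omega) ht1]
      rw [ih (t + 1) (acc ++ [(u :: ((list.drop i ++ list.take i).drop 1).reverse)[t]]) ht1 hmem'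
        (by omega)]
      rw [hdrop]
      simp only [pvCut, if_neg hb, List.append_assoc, List.singleton_append]

-- ===== VERDICT (by name: the statement is the Claim_ definition above) =====
theorem paths_to_base_spec : Claim_equal_paths_to_base := by
  intro list u base _ hpre
  obtain ⟨hu, hbase⟩ := hpre
  unfold Spec_paths_to_base
  cases hidx : PySem.List.index? list u with
  | none => exact absurd hu ((PySem.List.index?_eq_none_iff _ _).mp hidx)
  | some i =>
  obtain ⟨hi, hgu, -⟩ := PySem.List.getElem_of_index?_eq_some hidx
  have hlen : (list.drop i ++ list.take i).length = list.length := by simp; omega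
  have hrotmem : base ∈ list.drop i ++ list.take i := by
    rw [List.mem_append, or_comm, ← List.mem_append, List.take_append_drop]
    exact hbase
  have hget0 : (list.drop i ++ list.take i)[0]'(by omega) = u := by
    rw [List.getElem_append_left (by simp; omega), List.getElem_drop]
    simpa using hgu
  have hrot0 : (list.drop i ++ list.take i).getD 0 "" = u := by
    rw [List.getD_eq_getElem _ _ (by omega), hget0]
  simp only [paths_to_base, paths_to_base_alt, hidx, Option.getD_some,
    PySem.List.slice_from_natCast, PySem.List.slice_to_natCast]
  by_cases hub : u = base
  · rw [if_pos hub]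
    subst hub
    simp [pvLoopFwd, pvLoopBwd]
  · rw [if_neg hub]
    have h1 := pvLoopFwd_eq list base i hi (list.length + 1) 0 []
      (by omega) (by rw [List.drop_zero]; exact hrotmem) (by omega)
    simp only [Nat.add_zero, Nat.mod_eq_of_lt hi, hrot0, List.drop_zero, List.nil_append] at h1
    cases hjdx : PySem.List.index? (list.drop i ++ list.take i) base with
    | none => exact absurd hrotmem ((PySem.List.index?_eq_none_iff _ _).mp hjdx)
    | some j =>
    have hpath1 : (list.drop i ++ list.take i).take (j + 1)
        = pvCut base (list.drop i ++ list.take i) ++ [base] :=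
      pvCut_take base _ j hjdx
    -- second path
    have hrotcons : list.drop i ++ list.take i
        = u :: (list.drop i ++ list.take i).drop 1 := by
      conv_lhs => rw [← List.drop_zero (l := list.drop i ++ list.take i),
        List.drop_eq_getElem_cons (by omega)]
      rw [hget0]
    have htailmem : base ∈ ((list.drop i ++ list.take i).drop 1).reverse := by
      rw [List.mem_reverse]
      rcases List.mem_cons.mp (hrotcons ▸ hrotmem) with h | h
      · exact absurd h.symm hub
      · exact h
    have h2 := pvLoopBwd_eq list u base i hi (list.length + 1) 0 []
      (by omega) (by rw [List.drop_zero]; exact List.mem_cons_of_mem _ htailmem) (by omega)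
    simp only [Nat.sub_zero, Nat.add_mod_right, Nat.mod_eq_of_lt hi, List.getD_cons_zero,
      List.drop_zero, List.nil_append] at h2
    have hrevsplit : (list.drop i ++ list.take i).reverse
        = ((list.drop i ++ list.take i).drop 1).reverse ++ [u] := by
      conv_lhs => rw [hrotcons]
      simp
    cases hrdx : PySem.List.index? (((list.drop i ++ list.take i).drop 1).reverse) base with
    | none => exact absurd htailmem ((PySem.List.index?_eq_none_iff _ _).mp hrdx)
    | some r =>
    have hridx : PySem.List.index? ((list.drop i ++ list.take i).reverse) base = some r := by
      rw [hrevsplit, PySem.List.index?_append_of_mem _ htailmem, hrdx]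
    have hr : r < list.length - 1 := by
      obtain ⟨hk, -, -⟩ := PySem.List.getElem_of_index?_eq_some hrdx
      simp at hk
      omega
    have hpath2tail : (((list.drop i ++ list.take i).drop 1).reverse).take (r + 1)
        = pvCut base (((list.drop i ++ list.take i).drop 1).reverse) ++ [base] :=
      pvCut_take base _ r hrdx
    have hdropk : ((list.drop i ++ list.take i).drop
          ((list.drop i ++ list.take i).length - 1 - r)).reverse
        = (((list.drop i ++ list.take i).drop 1).reverse).take (r + 1) := by
      rw [List.reverse_drop]
      rw [show (list.drop i ++ list.take i).length
            - ((list.drop i ++ list.take i).length - 1 - r) = r + 1 by omega]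
      rw [hrevsplit, List.take_append_of_le_length (by simp; omega)]
    simp only [PySem.List.slice?_none_none_neg_one, Option.getD_some, hridx]
    rw [Prod.mk.injEq]
    constructor
    · rw [h1, show ((j : Int) + 1) = ((j + 1 : Nat) : Int) by push_cast; ring,
        PySem.List.slice_to_natCast, hpath1]
    · rw [h2, hdropk, hpath2tail]
      have hcuts2 : pvCut base (u :: ((list.drop i ++ list.take i).drop 1).reverse)
          = u :: pvCut base (((list.drop i ++ list.take i).drop 1).reverse) := by
        simp [pvCut, hub]
      rw [hcuts2]
      simp
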